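-- pv_equiv track=rewrite | github.com/LPMatrix/ai-agents-battle | geometry.py | direction_and_distance
-- ===== SOURCE A (Python) =====
-- DIRECTIONS = {
--     "N":  (0, -1),
--     "NE": (1, -1),
--     "E":  (1,  0),
--     "SE": (1,  1),
--     "S":  (0,  1),
--     "SW": (-1, 1),
--     "W":  (-1, 0),
--     "NW": (-1,-1),
-- }
--
-- def direction_and_distance(x1, y1, x2, y2):
--     dx = x2 - x1
--     dy = y2 - y1
--     for name, (ddx, ddy) in DIRECTIONS.items():
--         if dx * ddy != dy * ddx:
--             continue
--         if ddx != 0: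
--             t = dx // ddx
--         elif ddy != 0:
--             t = dy // ddy
--         else:
--             continue
--         if t > 0 and dx == t * ddx and dy == t * ddy:
--             return name, t
--     return None, None
-- ===== SOURCE B (Python) =====
-- _NAME = {
--     (0, -1): "N", (1, -1): "NE", (1, 0): "E", (1, 1): "SE",
--     (0, 1): "S", (-1, 1): "SW", (-1, 0): "W", (-1, -1): "NW",
-- }
--
-- def direction_and_distance(x1, y1, x2, y2):
--     dx = x2 - x1
--     dy = y2 - y1
--     if dx == 0 and dy == 0:
--         return None, None
--     if dx != 0 and dy != 0 and abs(dx) != abs(dy):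
--         return None, None
--     sx = (dx > 0) - (dx < 0)
--     sy = (dy > 0) - (dy < 0)
--     return _NAME[(sx, sy)], max(abs(dx), abs(dy))
-- ===== Notes on version B (the rewrite author's own statement) =====
-- stated objective: simpler
-- what changed: Replaces A's scan over the 8-entry DIRECTIONS dict (cross-product test plus floor-division back-check per entry) with a direct computation: reject non-axial non-diagonal displacements, then look the name up by the sign pair (sign dx, sign dy) and return max(|dx|,|dy|) as the distance.
import Mathlib
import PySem

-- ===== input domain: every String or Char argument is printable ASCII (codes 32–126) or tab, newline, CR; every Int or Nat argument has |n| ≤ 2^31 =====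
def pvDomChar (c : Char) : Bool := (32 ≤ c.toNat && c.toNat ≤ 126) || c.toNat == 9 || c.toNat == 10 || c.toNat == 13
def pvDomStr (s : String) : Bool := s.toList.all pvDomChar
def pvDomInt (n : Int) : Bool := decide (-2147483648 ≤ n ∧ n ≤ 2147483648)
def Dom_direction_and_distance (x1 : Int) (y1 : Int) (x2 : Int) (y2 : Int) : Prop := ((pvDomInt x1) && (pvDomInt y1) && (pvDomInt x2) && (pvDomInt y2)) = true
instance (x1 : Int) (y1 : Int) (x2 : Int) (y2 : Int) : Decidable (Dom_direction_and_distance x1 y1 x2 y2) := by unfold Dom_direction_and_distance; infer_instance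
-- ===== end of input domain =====

-- B replaces A's scan over the 8 candidate directions by a direct sign-pair lookup plus max(|dx|,|dy|) (objective: simpler).

-- ===== PORT A =====
-- the module constant DIRECTIONS (dict, insertion order)
def DIRECTIONS : List (String × (Int × Int)) :=
  [("N", (0, -1)), ("NE", (1, -1)), ("E", (1, 0)), ("SE", (1, 1)),
   ("S", (0, 1)), ("SW", (-1, 1)), ("W", (-1, 0)), ("NW", (-1, -1))]

-- A's for-loop with early return, as structural recursion over DIRECTIONS
def ddLoop (dx dy : Int) : List (String × (Int × Int)) → Option String × Option Int
  | [] => (none, none)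
  | (name, (ddx, ddy)) :: rest =>
    if dx * ddy ≠ dy * ddx then ddLoop dx dy rest
    else if ddx ≠ 0 then
      let t := PySem.Int.floordiv dx ddx
      if t > 0 ∧ dx = t * ddx ∧ dy = t * ddy then (some name, some t) else ddLoop dx dy rest
    else if ddy ≠ 0 then
      let t := PySem.Int.floordiv dy ddy
      if t > 0 ∧ dx = t * ddx ∧ dy = t * ddy then (some name, some t) else ddLoop dx dy rest
    else ddLoop dx dy rest

def direction_and_distance (x1 : Int) (y1 : Int) (x2 : Int) (y2 : Int) : Option String × Option Int :=
  ddLoop (x2 - x1) (y2 - y1) DIRECTIONS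

-- ===== PORT B =====
-- the module constant _NAME (dict keyed by the sign pair)
def pvNameTable : PySem.Dict (Int × Int) String :=
  PySem.Dict.ofList
    [((0, -1), "N"), ((1, -1), "NE"), ((1, 0), "E"), ((1, 1), "SE"),
     ((0, 1), "S"), ((-1, 1), "SW"), ((-1, 0), "W"), ((-1, -1), "NW")]

def direction_and_distance_alt (x1 : Int) (y1 : Int) (x2 : Int) (y2 : Int) : Option String × Option Int :=
  let dx := x2 - x1
  let dy := y2 - y1
  if dx = 0 ∧ dy = 0 then (none, none)
  else if dx ≠ 0 ∧ dy ≠ 0 ∧ |dx| ≠ |dy| then (none, none)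
  else
    let sx : Int := (if dx > 0 then 1 else 0) - (if dx < 0 then 1 else 0)
    let sy : Int := (if dy > 0 then 1 else 0) - (if dy < 0 then 1 else 0)
    (PySem.Dict.get? pvNameTable (sx, sy), some (max |dx| |dy|))

-- ===== PRECONDITION & SPEC =====
def Spec_direction_and_distance (x1 : Int) (y1 : Int) (x2 : Int) (y2 : Int) (out : Option String × Option Int) : Prop := out = direction_and_distance_alt x1 y1 x2 y2
instance (x1 : Int) (y1 : Int) (x2 : Int) (y2 : Int) (out : Option String × Option Int) : Decidable (Spec_direction_and_distance x1 y1 x2 y2 out) := by unfold Spec_direction_and_distance; infer_instance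

-- ===== CLAIM (what is proved, stated in full; the proofs are below) =====
def Claim_equal_direction_and_distance : Prop := ∀ (x1 : Int) (y1 : Int) (x2 : Int) (y2 : Int), Dom_direction_and_distance x1 y1 x2 y2 → Spec_direction_and_distance x1 y1 x2 y2 (direction_and_distance x1 y1 x2 y2)

-- ===== LEMMAS AND PROOFS =====
lemma fd1 (a : Int) : PySem.Int.floordiv a 1 = a := by simp [PySem.Int.floordiv]

lemma fdm1 (a : Int) : PySem.Int.floordiv a (-1) = -a := by
  show Int.fdiv a (-1) = -a
  rw [Int.fdiv_eq_ediv_of_dvd (by simp)]; omega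

lemma lkN : pvNameTable.get? ((0:Int), (-1:Int)) = some "N" := by decide
lemma lkNE : pvNameTable.get? ((1:Int), (-1:Int)) = some "NE" := by decide
lemma lkE : pvNameTable.get? ((1:Int), (0:Int)) = some "E" := by decide
lemma lkSE : pvNameTable.get? ((1:Int), (1:Int)) = some "SE" := by decide
lemma lkS : pvNameTable.get? ((0:Int), (1:Int)) = some "S" := by decide
lemma lkSW : pvNameTable.get? ((-1:Int), (1:Int)) = some "SW" := by decide
lemma lkW : pvNameTable.get? ((-1:Int), (0:Int)) = some "W" := by decide
lemma lkNW : pvNameTable.get? ((-1:Int), (-1:Int)) = some "NW" := by decide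

lemma dd_core (dx dy : Int) : ddLoop dx dy DIRECTIONS = direction_and_distance_alt 0 0 dx dy := by
  rcases lt_trichotomy dx 0 with hx | hx | hx <;>
    rcases lt_trichotomy dy 0 with hy | hy | hy
  · by_cases h : dx = dy
    · subst h
      simp [ddLoop, DIRECTIONS, direction_and_distance_alt, fdm1, hx, hx.ne, hx.le, abs_of_neg hx, lkNW,
        show ¬ (0:Int) < dx from not_lt.2 hx.le, show dx ≠ -dx by omega]
    · simp [ddLoop, DIRECTIONS, direction_and_distance_alt, fdm1, hx.ne, hy.ne, abs_of_neg hx, abs_of_neg hy, h,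
        show -dx ≠ dy by omega, show dx ≠ -dy by omega, show ¬ (0:Int) < dx from not_lt.2 hx.le]
  · subst hy
    simp [ddLoop, DIRECTIONS, direction_and_distance_alt, fdm1, hx, hx.ne, hx.le, abs_of_neg hx, lkW,
      show ¬ (0:Int) < dx from not_lt.2 hx.le, show (0:Int) ≤ -dx by omega]
  · by_cases h : dx = -dy
    · simp [ddLoop, DIRECTIONS, direction_and_distance_alt, fdm1, hx, hx.ne, hy.ne', abs_of_neg hx, abs_of_pos hy, h, lkSW,
        show ¬ (0:Int) < dx from not_lt.2 hx.le, show dy ≠ -dy by omega, show -dy ≠ dy by omega,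
        show ¬ dy < 0 from not_lt.2 hy.le, hy]
    · simp [ddLoop, DIRECTIONS, direction_and_distance_alt, fdm1, hx.ne, hy.ne', abs_of_neg hx, abs_of_pos hy, h,
        show -dx ≠ dy by omega, show dx ≠ dy by omega, show ¬ (0:Int) < dx from not_lt.2 hx.le]
  · subst hx
    simp [ddLoop, DIRECTIONS, direction_and_distance_alt, fdm1, hy, hy.ne, hy.le, abs_of_neg hy, lkN,
      show ¬ (0:Int) < dy from not_lt.2 hy.le, show (0:Int) < -dy by omega]
  · subst hx; subst hy
    simp [ddLoop, DIRECTIONS, direction_and_distance_alt, fdm1]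
  · subst hx
    simp [ddLoop, DIRECTIONS, direction_and_distance_alt, fd1, fdm1, hy, hy.ne', hy.le, abs_of_pos hy, lkS,
      show ¬ dy < 0 from not_lt.2 hy.le, show ¬ (0:Int) < -dy by omega]
  · by_cases h : dy = -dx
    · simp [ddLoop, DIRECTIONS, direction_and_distance_alt, fdm1, fd1, hx, hx.ne', hy.ne, abs_of_pos hx, abs_of_neg hy, h, lkNE,
        show dx ≠ -dx by omega, show -dx ≠ dx by omega, show ¬ dx < 0 from not_lt.2 hx.le]
    · simp [ddLoop, DIRECTIONS, direction_and_distance_alt, fdm1, fd1, hx.ne', hy.ne, abs_of_pos hx, abs_of_neg hy, h,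
        show -dx ≠ dy by omega, show dx ≠ dy by omega, show dx ≠ -dy by omega,
        show ¬ (0:Int) < dy from not_lt.2 hy.le]
  · subst hy
    simp [ddLoop, DIRECTIONS, direction_and_distance_alt, fd1, hx, hx.ne', hx.le, abs_of_pos hx, lkE,
      show ¬ dx < 0 from not_lt.2 hx.le, show ¬ (0:Int) < -dx by omega]
  · by_cases h : dx = dy
    · subst h
      simp [ddLoop, DIRECTIONS, direction_and_distance_alt, fd1, hx, hx.ne', abs_of_pos hx, lkSE,
        show dx ≠ -dx by omega, show -dx ≠ dx by omega, show ¬ dx < 0 from not_lt.2 hx.le]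
    · simp [ddLoop, DIRECTIONS, direction_and_distance_alt, fd1, hx.ne', hy.ne', abs_of_pos hx, abs_of_pos hy, h,
        show -dx ≠ dy by omega, show dx ≠ -dy by omega, show ¬ (0:Int) < -dx by omega]

lemma alt_shift (x1 y1 x2 y2 : Int) :
    direction_and_distance_alt x1 y1 x2 y2 = direction_and_distance_alt 0 0 (x2 - x1) (y2 - y1) := by
  simp [direction_and_distance_alt]

-- ===== VERDICT (by name: the statement is the Claim_ definition above) =====
theorem direction_and_distance_spec : Claim_equal_direction_and_distance := by
  intro x1 y1 x2 y2 _
  unfold Spec_direction_and_distance direction_and_distance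
  rw [alt_shift, dd_core]
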